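-- pv_equiv track=rewrite | github.com/Bcsaltdad/FitnessAPPv2 | main.py | fix_workout_plan
-- ===== SOURCE A (Python) =====
-- def fix_workout_plan(workout_plan, goal, experience_level):
--     """Attempts to fix issues with a workout plan"""
--     # This is a simplified version - in production you'd have more complex logic
--     fixed_plan = workout_plan.copy()
--
--     # Add placeholder exercises for missing muscle groups if needed
--     muscle_exercises = {
--         'chest': {'title': 'Push-up Variations', 'body_part': 'Chest', 'exercise_type': 'Compound'},
--         'back': {'title': 'Bodyweight Row', 'body_part': 'Back', 'exercise_type': 'Compound'},
--         'legs': {'title': 'Bodyweight Squat', 'body_part': 'Legs', 'exercise_type': 'Compound'},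
--         'shoulders': {'title': 'Pike Push-up', 'body_part': 'Shoulders', 'exercise_type': 'Compound'},
--         'arms': {'title': 'Tricep Dips', 'body_part': 'Arms', 'exercise_type': 'Isolation'},
--         'cardio': {'title': 'HIIT Intervals', 'body_part': 'Full Body', 'exercise_type': 'Cardio'}
--     }
--
--     # If "Body Building" goal, ensure enough isolation exercises
--     if "Body Building" in goal:
--         for day, exercises in fixed_plan.items():
--             isolation_count = len([e for e in exercises if e.get('exercise_type') == 'Isolation'])
--             if isolation_count < 3:  # Aim for at least 3 isolation exercises
--                 # Add some isolation exercises
--                 day_focus = day.split(' - ')[-1].lower() if ' - ' in day else ''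
--
--                 if 'chest' in day_focus:
--                     exercises.append({'title': 'Chest Flyes', 'body_part': 'Chest', 'exercise_type': 'Isolation'})
--                 elif 'back' in day_focus:
--                     exercises.append({'title': 'Straight Arm Pulldown', 'body_part': 'Back', 'exercise_type': 'Isolation'})
--                 elif 'legs' in day_focus:
--                     exercises.append({'title': 'Leg Extension', 'body_part': 'Legs', 'exercise_type': 'Isolation'})
--                 else:
--                     exercises.append({'title': 'Lateral Raises', 'body_part': 'Shoulders', 'exercise_type': 'Isolation'})
--
--     # If "Weight Loss" goal, ensure cardio in each day
--     if "Weight Loss" in goal: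
--         for day, exercises in fixed_plan.items():
--             has_cardio = any('cardio' in e.get('exercise_type', '').lower() for e in exercises)
--             if not has_cardio:
--                 exercises.append(muscle_exercises['cardio'])
--
--     return fixed_plan
-- ===== SOURCE B (Python) =====
-- # Data-driven rewrite: the goal-specific fixes become a table of
-- # (goal keyword, deficiency test, placeholder maker) rules; one reversed
-- # walk rebuilds the plan back-to-front applying the active rules per day.
-- # A mutates the argument's inner lists in place; B is pure, so the
-- # equivalence is about the return value only.
--
-- _ISO = {
--     'chest': {'title': 'Chest Flyes', 'body_part': 'Chest', 'exercise_type': 'Isolation'},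
--     'back': {'title': 'Straight Arm Pulldown', 'body_part': 'Back', 'exercise_type': 'Isolation'},
--     'legs': {'title': 'Leg Extension', 'body_part': 'Legs', 'exercise_type': 'Isolation'},
-- }
--
--
-- def _needs_isolation(exercises):
--     return sum(1 for e in exercises if e.get('exercise_type') == 'Isolation') < 3
--
--
-- def _make_isolation(day):
--     focus = day.split(' - ')[-1].lower() if ' - ' in day else ''
--     for key, ex in _ISO.items():
--         if key in focus:
--             return ex
--     return {'title': 'Lateral Raises', 'body_part': 'Shoulders', 'exercise_type': 'Isolation'}
--
--
-- def _needs_cardio(exercises):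
--     return not any('cardio' in e.get('exercise_type', '').lower() for e in exercises)
--
--
-- def _make_cardio(day):
--     return {'title': 'HIIT Intervals', 'body_part': 'Full Body', 'exercise_type': 'Cardio'}
--
--
-- _RULES = [('Body Building', _needs_isolation, _make_isolation),
--           ('Weight Loss', _needs_cardio, _make_cardio)]
--
--
-- def fix_workout_plan(workout_plan, goal, experience_level):
--     """Attempts to fix issues with a workout plan"""
--     rules = [r for r in _RULES if r[0] in goal]
--     fixed = []
--     for day, exercises in reversed(list(workout_plan.items())):
--         extras = [make(day) for _kw, needs, make in rules if needs(exercises)]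
--         fixed.append((day, exercises + extras))
--     return dict(reversed(fixed))
-- ===== Notes on version B (the rewrite author's own statement) =====
-- stated objective: alternative
-- what changed: A's two hard-coded per-goal loops are replaced by a data-driven rule table (goal keyword, deficiency test, placeholder maker) filtered by the goal once and applied per day in a single reversed walk that rebuilds the plan back-to-front without mutating the input.
import Mathlib
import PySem

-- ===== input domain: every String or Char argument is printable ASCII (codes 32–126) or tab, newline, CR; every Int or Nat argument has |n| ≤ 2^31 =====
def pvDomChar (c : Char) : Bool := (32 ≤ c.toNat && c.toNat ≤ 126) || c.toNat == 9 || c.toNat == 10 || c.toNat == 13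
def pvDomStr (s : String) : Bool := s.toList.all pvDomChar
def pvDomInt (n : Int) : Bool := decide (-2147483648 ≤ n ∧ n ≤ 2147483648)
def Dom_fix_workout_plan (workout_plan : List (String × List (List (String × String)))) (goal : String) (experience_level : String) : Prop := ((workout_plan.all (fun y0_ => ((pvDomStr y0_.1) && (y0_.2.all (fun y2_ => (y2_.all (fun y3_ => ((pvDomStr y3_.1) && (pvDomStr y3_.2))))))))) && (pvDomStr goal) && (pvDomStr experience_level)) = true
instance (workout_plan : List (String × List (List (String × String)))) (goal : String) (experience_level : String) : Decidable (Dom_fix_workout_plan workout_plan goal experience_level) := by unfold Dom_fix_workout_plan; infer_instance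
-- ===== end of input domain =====

-- B replaces A's two hard-coded per-goal loops by a rule table (goal keyword,
-- deficiency test, placeholder maker) filtered by the goal once and applied per
-- day in one reversed walk that rebuilds the plan back-to-front (objective:
-- alternative). A mutates the argument's inner exercise lists in place
-- (shallow copy); B does not — the equivalence proved here is about the
-- RETURN value only.

-- ===== PORT A =====
-- e.get(k) on an exercise dict (first match = Python dict lookup)
def pvGet (e : List (String × String)) (k : String) : Option String :=
  (PySem.Dict.mk e).get? k

-- day.split(' - ')[-1].lower() if ' - ' in day else ''
def pvDayFocus (day : String) : String :=
  if PySem.Str.isIn " - " day then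
    PySem.Str.lower (PySem.List.pyGetD ((PySem.Str.split? day " - ").getD []) (-1) "")
  else ""

def fix_workout_plan (workout_plan : List (String × List (List (String × String)))) (goal : String) (experience_level : String) : List (String × List (List (String × String))) :=
  let fixed_plan := workout_plan
  let fixed_plan :=
    if PySem.Str.isIn "Body Building" goal then
      fixed_plan.map (fun de =>
        let day := de.1
        let exercises := de.2
        let isolation_count := (exercises.filter (fun e => pvGet e "exercise_type" == some "Isolation")).length
        if isolation_count < 3 then
          let day_focus := pvDayFocus day
          if PySem.Str.isIn "chest" day_focus then
            (day, exercises ++ [[("title", "Chest Flyes"), ("body_part", "Chest"), ("exercise_type", "Isolation")]])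
          else if PySem.Str.isIn "back" day_focus then
            (day, exercises ++ [[("title", "Straight Arm Pulldown"), ("body_part", "Back"), ("exercise_type", "Isolation")]])
          else if PySem.Str.isIn "legs" day_focus then
            (day, exercises ++ [[("title", "Leg Extension"), ("body_part", "Legs"), ("exercise_type", "Isolation")]])
          else
            (day, exercises ++ [[("title", "Lateral Raises"), ("body_part", "Shoulders"), ("exercise_type", "Isolation")]])
        else (day, exercises))
    else fixed_plan
  let fixed_plan :=
    if PySem.Str.isIn "Weight Loss" goal then
      fixed_plan.map (fun de =>
        let has_cardio := de.2.any (fun e => PySem.Str.isIn "cardio" (PySem.Str.lower ((pvGet e "exercise_type").getD "")))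
        if !has_cardio then
          (de.1, de.2 ++ [[("title", "HIIT Intervals"), ("body_part", "Full Body"), ("exercise_type", "Cardio")]])
        else (de.1, de.2))
    else fixed_plan
  fixed_plan

-- ===== PORT B =====
-- the _ISO table of Source B
def pvIso : List (String × List (String × String)) :=
  [("chest", [("title", "Chest Flyes"), ("body_part", "Chest"), ("exercise_type", "Isolation")]),
   ("back", [("title", "Straight Arm Pulldown"), ("body_part", "Back"), ("exercise_type", "Isolation")]),
   ("legs", [("title", "Leg Extension"), ("body_part", "Legs"), ("exercise_type", "Isolation")])]

def pvNeedsIsolation (exercises : List (List (String × String))) : Bool :=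
  decide (exercises.countP (fun e => pvGet e "exercise_type" == some "Isolation") < 3)

-- the for-return loop of _make_isolation, as find? over the table
def pvMakeIsolation (day : String) : List (String × String) :=
  let focus :=
    if PySem.Str.isIn " - " day then
      PySem.Str.lower (PySem.List.pyGetD ((PySem.Str.split? day " - ").getD []) (-1) "")
    else ""
  (((pvIso.find? (fun kv => PySem.Str.isIn kv.1 focus)).map (·.2)).getD
    [("title", "Lateral Raises"), ("body_part", "Shoulders"), ("exercise_type", "Isolation")])

def pvNeedsCardio (exercises : List (List (String × String))) : Bool :=
  !(exercises.any (fun e => PySem.Str.isIn "cardio" (PySem.Str.lower ((pvGet e "exercise_type").getD ""))))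

def pvMakeCardio (_day : String) : List (String × String) :=
  [("title", "HIIT Intervals"), ("body_part", "Full Body"), ("exercise_type", "Cardio")]

-- the _RULES table of Source B
def pvRules : List (String × (List (List (String × String)) → Bool) × (String → List (String × String))) :=
  [("Body Building", pvNeedsIsolation, pvMakeIsolation),
   ("Weight Loss", pvNeedsCardio, pvMakeCardio)]

def fix_workout_plan_alt (workout_plan : List (String × List (List (String × String)))) (goal : String) (experience_level : String) : List (String × List (List (String × String))) :=
  let rules := pvRules.filter (fun r => PySem.Str.isIn r.1 goal)
  let fixed := workout_plan.reverse.foldl (fun acc de =>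
    acc ++ [(de.1, de.2 ++ rules.filterMap (fun r => if r.2.1 de.2 then some (r.2.2 de.1) else none))]) []
  fixed.reverse

-- ===== PRECONDITION & SPEC =====
def Spec_fix_workout_plan (workout_plan : List (String × List (List (String × String)))) (goal : String) (experience_level : String) (out : List (String × List (List (String × String)))) : Prop := out = fix_workout_plan_alt workout_plan goal experience_level
instance (workout_plan : List (String × List (List (String × String)))) (goal : String) (experience_level : String) (out : List (String × List (List (String × String)))) : Decidable (Spec_fix_workout_plan workout_plan goal experience_level out) := by unfold Spec_fix_workout_plan; infer_instance

-- ===== CLAIM (what is proved, stated in full; the proofs are below) =====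
def Claim_equal_fix_workout_plan : Prop := ∀ (workout_plan : List (String × List (List (String × String)))) (goal : String) (experience_level : String), Dom_fix_workout_plan workout_plan goal experience_level → Spec_fix_workout_plan workout_plan goal experience_level (fix_workout_plan workout_plan goal experience_level)

-- ===== LEMMAS AND PROOFS =====

-- B's snoc-accumulating loop is a map
lemma pv_foldl_snoc {α β : Type} (f : α → β) : ∀ (l : List α) (acc : List β),
    l.foldl (fun acc x => acc ++ [f x]) acc = acc ++ l.map f
  | [], acc => by simp
  | x :: l, acc => by simp [List.foldl_cons, pv_foldl_snoc f l]

-- B's reversed accumulate-then-reverse walk is the map over the days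
lemma pv_alt_eq_map (wp : List (String × List (List (String × String)))) (goal el : String) :
    fix_workout_plan_alt wp goal el =
      wp.map (fun de => (de.1, de.2 ++ (pvRules.filter (fun r => PySem.Str.isIn r.1 goal)).filterMap
        (fun r => if r.2.1 de.2 then some (r.2.2 de.1) else none))) := by
  unfold fix_workout_plan_alt
  simp only [pv_foldl_snoc, List.nil_append, List.map_reverse, List.reverse_reverse]

-- the extras the active rules produce, for each concrete filtered rule list
lemma pv_extras_bb_wl (day : String) (exs : List (List (String × String))) :
    ([("Body Building", pvNeedsIsolation, pvMakeIsolation),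
      ("Weight Loss", pvNeedsCardio, pvMakeCardio)]
        : List (String × (List (List (String × String)) → Bool) × (String → List (String × String)))).filterMap
      (fun r => if r.2.1 exs then some (r.2.2 day) else none) =
    (if pvNeedsIsolation exs then [pvMakeIsolation day] else []) ++
      (if pvNeedsCardio exs then [pvMakeCardio day] else []) := by
  cases h1 : pvNeedsIsolation exs <;> cases h2 : pvNeedsCardio exs <;>
    simp [List.filterMap, h1, h2]

lemma pv_extras_bb (day : String) (exs : List (List (String × String))) :
    ([("Body Building", pvNeedsIsolation, pvMakeIsolation)]
        : List (String × (List (List (String × String)) → Bool) × (String → List (String × String)))).filterMap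
      (fun r => if r.2.1 exs then some (r.2.2 day) else none) =
    (if pvNeedsIsolation exs then [pvMakeIsolation day] else []) ++ ([] : List (List (String × String))) := by
  cases h1 : pvNeedsIsolation exs <;> simp [List.filterMap, h1]

lemma pv_extras_wl (day : String) (exs : List (List (String × String))) :
    ([("Weight Loss", pvNeedsCardio, pvMakeCardio)]
        : List (String × (List (List (String × String)) → Bool) × (String → List (String × String)))).filterMap
      (fun r => if r.2.1 exs then some (r.2.2 day) else none) =
    ([] : List (List (String × String))) ++ (if pvNeedsCardio exs then [pvMakeCardio day] else []) := by
  cases h2 : pvNeedsCardio exs <;> simp [List.filterMap, h2]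

-- none of the four isolation placeholders A can append passes the cardio test
lemma pv_nc_chest : PySem.Chars.isIn ['c','a','r','d','i','o'] (PySem.Chars.lower ((pvGet [("title", "Chest Flyes"), ("body_part", "Chest"), ("exercise_type", "Isolation")] "exercise_type").getD "").toList) = false := by decide
lemma pv_nc_back : PySem.Chars.isIn ['c','a','r','d','i','o'] (PySem.Chars.lower ((pvGet [("title", "Straight Arm Pulldown"), ("body_part", "Back"), ("exercise_type", "Isolation")] "exercise_type").getD "").toList) = false := by decide
lemma pv_nc_legs : PySem.Chars.isIn ['c','a','r','d','i','o'] (PySem.Chars.lower ((pvGet [("title", "Leg Extension"), ("body_part", "Legs"), ("exercise_type", "Isolation")] "exercise_type").getD "").toList) = false := by decide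
lemma pv_nc_lat : PySem.Chars.isIn ['c','a','r','d','i','o'] (PySem.Chars.lower ((pvGet [("title", "Lateral Raises"), ("body_part", "Shoulders"), ("exercise_type", "Isolation")] "exercise_type").getD "").toList) = false := by decide

-- per-day fact: A's second-pass step applied after A's first-pass step equals
-- B's day plus the extras produced by the active rules (bb for Body Building,
-- wl for Weight Loss)
set_option maxHeartbeats 2000000 in
lemma pv_day_eq (day : String) (exs : List (List (String × String))) (bb wl : Bool) :
    (let st1 : String × List (List (String × String)) :=
      if bb then
        (let isolation_count := (exs.filter (fun e => pvGet e "exercise_type" == some "Isolation")).length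
         if isolation_count < 3 then
           let day_focus := pvDayFocus day
           if PySem.Str.isIn "chest" day_focus then
             (day, exs ++ [[("title", "Chest Flyes"), ("body_part", "Chest"), ("exercise_type", "Isolation")]])
           else if PySem.Str.isIn "back" day_focus then
             (day, exs ++ [[("title", "Straight Arm Pulldown"), ("body_part", "Back"), ("exercise_type", "Isolation")]])
           else if PySem.Str.isIn "legs" day_focus then
             (day, exs ++ [[("title", "Leg Extension"), ("body_part", "Legs"), ("exercise_type", "Isolation")]])
           else
             (day, exs ++ [[("title", "Lateral Raises"), ("body_part", "Shoulders"), ("exercise_type", "Isolation")]])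
         else (day, exs))
      else (day, exs)
     if wl then
       (if !(st1.2.any (fun e => PySem.Str.isIn "cardio" (PySem.Str.lower ((pvGet e "exercise_type").getD "")))) then
          (st1.1, st1.2 ++ [[("title", "HIIT Intervals"), ("body_part", "Full Body"), ("exercise_type", "Cardio")]])
        else (st1.1, st1.2))
     else st1) =
    (day, exs ++ ((if bb && pvNeedsIsolation exs then [pvMakeIsolation day] else []) ++
                  (if wl && pvNeedsCardio exs then [pvMakeCardio day] else []))) := by
  cases bb <;> cases wl <;>
    simp only [pvNeedsIsolation, pvNeedsCardio, pvMakeIsolation, pvMakeCardio, pvDayFocus,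
      Bool.false_and, Bool.true_and, if_true, List.countP_eq_length_filter] <;>
    split_ifs <;>
    simp_all [pvIso, List.find?, List.any_append,
      pv_nc_chest, pv_nc_back, pv_nc_legs, pv_nc_lat] <;>
    first
      | omega
      | (obtain ⟨x, hxm, hxp⟩ := ‹∃ x ∈ exs, PySem.Chars.isIn ['c','a','r','d','i','o'] (PySem.Chars.lower ((pvGet x "exercise_type").getD "").toList) = true›
         have hall := ‹∀ x ∈ exs, PySem.Chars.isIn ['c','a','r','d','i','o'] (PySem.Chars.lower ((pvGet x "exercise_type").getD "").toList) = false›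
         exact absurd hxp (by simp [hall x hxm]))

-- ===== VERDICT (by name: the statement is the Claim_ definition above) =====
theorem fix_workout_plan_spec : Claim_equal_fix_workout_plan := by
  intro wp goal el _
  unfold Spec_fix_workout_plan
  rw [pv_alt_eq_map]
  unfold fix_workout_plan
  cases hbb : PySem.Str.isIn "Body Building" goal <;>
    cases hwl : PySem.Str.isIn "Weight Loss" goal <;>
    simp only [pvRules, List.filter, hbb, hwl, Bool.false_eq_true, if_false, if_true, List.map_map]
  · simp [List.filterMap]
  · exact List.map_congr_left fun de _ => by
      rw [pv_extras_wl]
      have h := pv_day_eq de.1 de.2 false true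
      simpa using h
  · exact List.map_congr_left fun de _ => by
      rw [pv_extras_bb]
      have h := pv_day_eq de.1 de.2 true false
      simpa using h
  · exact List.map_congr_left fun de _ => by
      rw [pv_extras_bb_wl]
      have h := pv_day_eq de.1 de.2 true true
      simpa using h
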